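-- pv_equiv track=rewrite | github.com/pypi-data/pypi-mirror-349 | packages/bennycloth/bennycloth-0.0.20.tar.gz/bennycloth-0.0.20/bennycloth/timeseries/generatepeaks.py | GeneratePeaks
-- ===== SOURCE A (Python) =====
-- def GeneratePeaks(values,tensionOnly=False,compressionOnly=False):
--     N = len(values)
--     if N < 1:
--         return []
--
--     t = [0]
--     f = [0]
--
--     for i in range(N):
--         a = values[i]
--
--         if not compressionOnly:
--             t.append(t[-1]+a)
--             f.append(a)
--             t.append(t[-1]+a)
--             f.append(0)
--         if not tensionOnly:
--             t.append(t[-1]+a)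
--             f.append(-a)
--             t.append(t[-1]+a)
--             f.append(0)
--
--     return t,f
-- ===== SOURCE B (Python) =====
-- def GeneratePeaks(values, tensionOnly=False, compressionOnly=False):
--     # Build f and the list of raw time increments in one pass, then t as prefix sums.
--     f = [0]
--     incs = []
--     for a in values:
--         if not compressionOnly:
--             f += [a, 0]
--             incs += [a, a]
--         if not tensionOnly:
--             f += [-a, 0]
--             incs += [a, a]
--     t = [0]
--     s = 0
--     for x in incs:
--         s += x
--         t.append(s)
--     return t, f
-- ===== Notes on version B (the rewrite author's own statement) =====
-- stated objective: alternative
-- what changed: B replaces A's inline running-total appends to t with a two-phase pass: one loop collects f and a table of raw increments, then t is built as a separate prefix-sum pass; the N<1 early return of a bare [] is dropped.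
-- outside the precondition, e.g. on GeneratePeaks([], False, False): A returns (), B returns ([0], [0])
import Mathlib
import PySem

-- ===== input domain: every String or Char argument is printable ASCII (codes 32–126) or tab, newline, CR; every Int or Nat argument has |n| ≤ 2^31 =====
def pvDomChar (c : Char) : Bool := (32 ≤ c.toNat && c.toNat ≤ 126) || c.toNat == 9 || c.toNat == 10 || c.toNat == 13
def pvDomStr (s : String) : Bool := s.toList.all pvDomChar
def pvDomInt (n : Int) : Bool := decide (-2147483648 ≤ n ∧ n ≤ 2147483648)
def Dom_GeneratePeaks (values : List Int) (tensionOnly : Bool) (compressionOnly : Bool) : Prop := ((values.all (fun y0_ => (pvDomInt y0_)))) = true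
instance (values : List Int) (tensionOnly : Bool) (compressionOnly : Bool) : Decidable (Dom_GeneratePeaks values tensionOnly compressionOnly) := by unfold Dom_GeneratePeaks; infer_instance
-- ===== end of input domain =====

-- B builds f and a table of raw increments in one loop, then t as a separate prefix-sum pass
-- (alternative decomposition, same cost); return value only, no mutation observable.

-- ===== PORT A =====
-- one iteration of A's for-loop: appends to t via t[-1] (t is never empty, getLast! is exact)
def pvStepA (tensionOnly compressionOnly : Bool) (tf : List Int × List Int) (a : Int) : List Int × List Int :=
  let t := tf.1
  let f := tf.2
  let (t, f) :=
    if compressionOnly = false then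
      let t := t ++ [t.getLast! + a]
      let f := f ++ [a]
      let t := t ++ [t.getLast! + a]
      let f := f ++ [0]
      (t, f)
    else (t, f)
  if tensionOnly = false then
    let t := t ++ [t.getLast! + a]
    let f := f ++ [-a]
    let t := t ++ [t.getLast! + a]
    let f := f ++ [0]
    (t, f)
  else (t, f)

def GeneratePeaks (values : List Int) (tensionOnly : Bool) (compressionOnly : Bool) : List Int × List Int :=
  if values.length < 1 then ([], [])  -- A returns a bare [] here (not a pair); excluded by Pre_
  else values.foldl (pvStepA tensionOnly compressionOnly) ([0], [0])

-- ===== PORT B =====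
-- one iteration of B's first loop over (f, incs)
def pvStepB (tensionOnly compressionOnly : Bool) (s : List Int × List Int) (a : Int) : List Int × List Int :=
  let s := if compressionOnly = false then (s.1 ++ [a, 0], s.2 ++ [a, a]) else s
  if tensionOnly = false then (s.1 ++ [-a, 0], s.2 ++ [a, a]) else s

-- B's second loop: running prefix sums of incs
def pvAccum (c : Int) : List Int → List Int
  | [] => []
  | x :: xs => (c + x) :: pvAccum (c + x) xs

def GeneratePeaks_alt (values : List Int) (tensionOnly : Bool) (compressionOnly : Bool) : List Int × List Int :=
  let s := values.foldl (pvStepB tensionOnly compressionOnly) ([0], ([] : List Int))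
  (0 :: pvAccum 0 s.2, s.1)

-- ===== PRECONDITION & SPEC =====
-- Pre_ excludes the empty list, on which A returns a bare [] instead of a (t, f) pair of lists.
def Pre_GeneratePeaks (values : List Int) (tensionOnly : Bool) (compressionOnly : Bool) : Prop := values ≠ []
instance (values : List Int) (tensionOnly : Bool) (compressionOnly : Bool) : Decidable (Pre_GeneratePeaks values tensionOnly compressionOnly) := by unfold Pre_GeneratePeaks; infer_instance
def pvWitness_GeneratePeaks : List Int × Bool × Bool := ([3, -2], false, false)

def Spec_GeneratePeaks (values : List Int) (tensionOnly : Bool) (compressionOnly : Bool) (out : List Int × List Int) : Prop := out = GeneratePeaks_alt values tensionOnly compressionOnly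
instance (values : List Int) (tensionOnly : Bool) (compressionOnly : Bool) (out : List Int × List Int) : Decidable (Spec_GeneratePeaks values tensionOnly compressionOnly out) := by unfold Spec_GeneratePeaks; infer_instance

-- ===== CLAIM (what is proved, stated in full; the proofs are below) =====
def Claim_equal_GeneratePeaks : Prop := ∀ (values : List Int) (tensionOnly : Bool) (compressionOnly : Bool), Dom_GeneratePeaks values tensionOnly compressionOnly → Pre_GeneratePeaks values tensionOnly compressionOnly → Spec_GeneratePeaks values tensionOnly compressionOnly (GeneratePeaks values tensionOnly compressionOnly)

-- ===== LEMMAS AND PROOFS =====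
def pvIncs (tO cO : Bool) (l : List Int) : List Int :=
  l.flatMap (fun a => (if cO = false then [a, a] else []) ++ (if tO = false then [a, a] else []))
def pvPat (tO cO : Bool) (l : List Int) : List Int :=
  l.flatMap (fun a => (if cO = false then [a, 0] else []) ++ (if tO = false then [-a, 0] else []))

theorem pvAccum_append (xs : List Int) : ∀ (c : Int) (ys : List Int),
    pvAccum c (xs ++ ys) = pvAccum c xs ++ pvAccum (c + xs.sum) ys := by
  induction xs with
  | nil => simp [pvAccum]
  | cons x xs ih => intro c ys; simp [pvAccum, ih (c + x) ys, add_assoc]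

theorem pvGetLast_concat (t : List Int) (v : Int) : (t ++ [v]).getLast! = v := by
  cases t with
  | nil => rfl
  | cons a as => simp [List.getLast!, List.getLast_append]

theorem pvGetLast_append_accum (xs : List Int) : ∀ (t : List Int) (c : Int),
    t ≠ [] → t.getLast! = c → (t ++ pvAccum c xs).getLast! = c + xs.sum := by
  induction xs with
  | nil => intro t c h hl; simpa [pvAccum] using hl
  | cons x xs ih =>
    intro t c h hl
    have : t ++ pvAccum c (x :: xs) = (t ++ [c + x]) ++ pvAccum (c + x) xs := by
      simp [pvAccum]
    rw [this, ih (t ++ [c + x]) (c + x) (by simp) (pvGetLast_concat t (c + x))]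
    simp [add_assoc]

theorem pvStepA_eq (tO cO : Bool) (t f : List Int) (a : Int) (h : t ≠ []) :
    pvStepA tO cO (t, f) a
      = (t ++ pvAccum t.getLast! (pvIncs tO cO [a]), f ++ pvPat tO cO [a]) := by
  cases tO <;> cases cO <;>
    simp [pvStepA, pvIncs, pvPat, pvAccum, pvGetLast_concat, add_assoc]

theorem pvFoldA (tO cO : Bool) (l : List Int) : ∀ (t f : List Int), t ≠ [] →
    List.foldl (pvStepA tO cO) (t, f) l
      = (t ++ pvAccum t.getLast! (pvIncs tO cO l), f ++ pvPat tO cO l) := by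
  induction l with
  | nil => intro t f h; simp [pvAccum, pvIncs, pvPat]
  | cons a l ih =>
    intro t f h
    have h1 : pvIncs tO cO (a :: l) = pvIncs tO cO [a] ++ pvIncs tO cO l := by
      simp [pvIncs]
    have h2 : pvPat tO cO (a :: l) = pvPat tO cO [a] ++ pvPat tO cO l := by
      simp [pvPat]
    rw [List.foldl_cons, pvStepA_eq tO cO t f a h,
      ih _ _ (by intro hc; exact h (by cases t <;> simp_all [pvAccum])),
      pvGetLast_append_accum (pvIncs tO cO [a]) t t.getLast! h rfl,
      h1, h2, pvAccum_append]
    simp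

theorem pvFoldB (tO cO : Bool) (l : List Int) : ∀ (f incs : List Int),
    List.foldl (pvStepB tO cO) (f, incs) l
      = (f ++ pvPat tO cO l, incs ++ pvIncs tO cO l) := by
  induction l with
  | nil => intro f incs; simp [pvIncs, pvPat]
  | cons a l ih =>
    intro f incs
    rw [List.foldl_cons, ih]
    cases tO <;> cases cO <;> simp [pvStepB, pvIncs, pvPat]

-- ===== VERDICT (by name: the statement is the Claim_ definition above) =====
theorem GeneratePeaks_spec : Claim_equal_GeneratePeaks := by
  intro values tO cO _ hpre
  unfold Spec_GeneratePeaks GeneratePeaks GeneratePeaks_alt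
  have hlen : ¬ values.length < 1 := by
    cases values with
    | nil => exact absurd rfl hpre
    | cons a l => simp
  rw [if_neg hlen, pvFoldA tO cO values [0] [0] (by simp), pvFoldB tO cO values [0] []]
  simp [List.getLast!]
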